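-- pv_equiv track=rewrite | github.com/nadja4/turtlebot3-ros2-autonomous-frontier-based-exploration | autonomous_exploration/autonomous_exploration/control.py | assign_groups
-- ===== SOURCE A (Python) =====
-- def dfs(matrix, i, j, group, groups):
--     if i < 0 or i >= len(matrix) or j < 0 or j >= len(matrix[0]):
--         return group
--     if matrix[i][j] != 2:
--         return group
--     if group in groups:
--         groups[group].append((i, j))
--     else:
--         groups[group] = [(i, j)]
--     matrix[i][j] = 0
--     dfs(matrix, i + 1, j, group, groups)
--     dfs(matrix, i - 1, j, group, groups)
--     dfs(matrix, i, j + 1, group, groups)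
--     dfs(matrix, i, j - 1, group, groups)
--     dfs(matrix, i + 1, j + 1, group, groups)  # lower right cross
--     dfs(matrix, i - 1, j - 1, group, groups)  # upper left cross
--     dfs(matrix, i - 1, j + 1, group, groups)  # upper right cross
--     dfs(matrix, i + 1, j - 1, group, groups)  # lower left cross
--     return group + 1
--
-- def assign_groups(matrix):
--     group = 1
--     groups = {}  # Dictionary for group keys and coordinates
--     # Iterate through each position in the map
--     for i in range(len(matrix)):
--         for j in range(len(matrix[0])):
--             # Check if current cell is marked as frontier
--             if matrix[i][j] == 2:
--                 group = dfs(matrix, i, j, group, groups)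
--     return groups
-- ===== SOURCE B (Python) =====
-- def assign_groups(matrix):
--     group = 1
--     groups = {}
--     for i in range(len(matrix)):
--         for j in range(len(matrix[0])):
--             if matrix[i][j] == 2:
--                 cells = []
--                 stack = [(i, j)]
--                 while stack:
--                     ci, cj = stack.pop()
--                     if ci < 0 or ci >= len(matrix) or cj < 0 or cj >= len(matrix[0]):
--                         continue
--                     if matrix[ci][cj] != 2:
--                         continue
--                     cells.append((ci, cj))
--                     matrix[ci][cj] = 0
--                     # push the 8 neighbors in reverse of the recursion's visit
--                     # order, so they pop in the original pre-order
--                     stack.extend(((ci + 1, cj - 1), (ci - 1, cj + 1),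
--                                   (ci - 1, cj - 1), (ci + 1, cj + 1),
--                                   (ci, cj - 1), (ci, cj + 1),
--                                   (ci - 1, cj), (ci + 1, cj)))
--                 groups[group] = cells
--                 group += 1
--     return groups
-- ===== Notes on version B (the rewrite author's own statement) =====
-- stated objective: alternative
-- what changed: The recursive 8-way dfs is replaced by an explicit LIFO stack drained in a while loop (neighbors pushed in reverse so they pop in the recursion's pre-order), and each component's cell list is built locally and inserted into the dict once instead of appending cell-by-cell through the recursion.
import Mathlib
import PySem

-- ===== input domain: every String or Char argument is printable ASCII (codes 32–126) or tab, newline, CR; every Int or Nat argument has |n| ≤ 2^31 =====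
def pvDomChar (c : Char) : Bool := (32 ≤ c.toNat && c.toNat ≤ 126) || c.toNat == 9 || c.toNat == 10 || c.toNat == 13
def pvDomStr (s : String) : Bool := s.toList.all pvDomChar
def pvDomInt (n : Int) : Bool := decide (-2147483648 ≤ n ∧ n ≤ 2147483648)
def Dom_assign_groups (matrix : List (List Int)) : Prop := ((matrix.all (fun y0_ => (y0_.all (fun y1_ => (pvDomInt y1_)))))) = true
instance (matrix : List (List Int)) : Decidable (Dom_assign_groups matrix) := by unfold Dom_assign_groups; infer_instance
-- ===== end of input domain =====

-- B replaces A's recursive 8-connected dfs by an explicit LIFO stack drained in a loop (neighbors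
-- pushed in reverse so they pop in the recursion's pre-order) and inserts each component's cell list
-- into the dict once; in Python both mutate `matrix` identically (visited 2-cells zeroed), the
-- theorems are about the return value.

-- state of the scan loops: (matrix, groups, group)
abbrev PVSt : Type := List (List Int) × PySem.Dict Int (List (Int × Int)) × Int

-- ===== PORT A =====
-- matrix[i][j]; every evaluation site guards 0 ≤ i < len(matrix) and 0 ≤ j first, so the
-- `getD` defaults are only reached where Python A raises IndexError (outside Pre_)
def pvCell (m : List (List Int)) (i j : Int) : Int :=
  (PySem.List.pyGet? ((PySem.List.pyGet? m i).getD []) j).getD 0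

-- len(matrix[0]); only evaluated with matrix nonempty (the loops are empty otherwise)
def pvRow0Len (m : List (List Int)) : Int := ((m.headD []).length : Int)

-- matrix[i][j] = v; only evaluated with 0 ≤ i < len(matrix), 0 ≤ j < len(matrix[i])
def pvSetCell (m : List (List Int)) (i j v : Int) : List (List Int) :=
  m.set i.toNat ((m.getD i.toNat []).set j.toNat v)

-- number of 2-cells: fuel bound for the dfs recursion (a totality guard only; the Python
-- recursion nests strictly less deep, the 0-fuel branch is never reached on any input)
def pvCount2 (m : List (List Int)) : Nat := (m.map (fun r => r.count 2)).sum

def dfsA : Nat → List (List Int) → Int → Int → Int → PySem.Dict Int (List (Int × Int)) →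
    List (List Int) × PySem.Dict Int (List (Int × Int)) × Int
  | 0, m, _, _, group, groups => (m, groups, group)
  | fuel + 1, m, i, j, group, groups =>
    if i < 0 ∨ (m.length : Int) ≤ i ∨ j < 0 ∨ pvRow0Len m ≤ j then (m, groups, group)
    else if pvCell m i j ≠ 2 then (m, groups, group)
    else
      -- `if group in groups: append else: singleton` is dict modify with default []
      let gs0 := groups.modify group [] (fun l => l ++ [(i, j)])
      let m0 := pvSetCell m i j 0
      let r1 := dfsA fuel m0 (i + 1) j group gs0
      let r2 := dfsA fuel r1.1 (i - 1) j group r1.2.1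
      let r3 := dfsA fuel r2.1 i (j + 1) group r2.2.1
      let r4 := dfsA fuel r3.1 i (j - 1) group r3.2.1
      let r5 := dfsA fuel r4.1 (i + 1) (j + 1) group r4.2.1
      let r6 := dfsA fuel r5.1 (i - 1) (j - 1) group r5.2.1
      let r7 := dfsA fuel r6.1 (i - 1) (j + 1) group r6.2.1
      let r8 := dfsA fuel r7.1 (i + 1) (j - 1) group r7.2.1
      (r8.1, r8.2.1, group + 1)

-- body of A's inner `for j in range(len(matrix[0]))` loop
def pvInnerA (i : Int) (s : PVSt) (j : Int) : PVSt :=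
  if pvCell s.1 i j = 2 then dfsA (pvCount2 s.1 + 1) s.1 i j s.2.2 s.2.1 else s

-- body of A's outer `for i in range(len(matrix))` loop
def pvOuterA (s : PVSt) (i : Int) : PVSt :=
  (PySem.List.pyRange 0 (pvRow0Len s.1) 1).foldl (pvInnerA i) s

def assign_groups (matrix : List (List Int)) : List (Int × List (Int × Int)) :=
  ((PySem.List.pyRange 0 (matrix.length : Int) 1).foldl pvOuterA
    (matrix, PySem.Dict.empty, (1 : Int))).2.1.items

-- ===== PORT B =====
-- the eight tuples B extends the stack with, top of the stack first
-- (Python pops from the end; the Lean list keeps the top at the head)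
def pvNbrs (ci cj : Int) : List (Int × Int) :=
  [(ci + 1, cj), (ci - 1, cj), (ci, cj + 1), (ci, cj - 1),
   (ci + 1, cj + 1), (ci - 1, cj - 1), (ci - 1, cj + 1), (ci + 1, cj - 1)]

-- B's `while stack:` loop; fuel is a totality guard only (each iteration pops one entry and
-- pushes 8 only when it zeroes a 2-cell, the 0-fuel branch is never reached on any input)
def altLoop : Nat → List (List Int) → List (Int × Int) → List (Int × Int) →
    List (List Int) × List (Int × Int)
  | 0, m, _, cells => (m, cells)
  | _ + 1, m, [], cells => (m, cells)
  | fuel + 1, m, (ci, cj) :: st, cells =>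
    if ci < 0 ∨ (m.length : Int) ≤ ci ∨ cj < 0 ∨ pvRow0Len m ≤ cj then altLoop fuel m st cells
    else if pvCell m ci cj ≠ 2 then altLoop fuel m st cells
    else altLoop fuel (pvSetCell m ci cj 0) (pvNbrs ci cj ++ st) (cells ++ [(ci, cj)])

-- body of B's inner `for j` loop
def pvInnerB (i : Int) (s : PVSt) (j : Int) : PVSt :=
  if pvCell s.1 i j = 2 then
    let r := altLoop (8 * pvCount2 s.1 + 2) s.1 [(i, j)] []
    (r.1, s.2.1.insert s.2.2 r.2, s.2.2 + 1)
  else s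

-- body of B's outer `for i` loop
def pvOuterB (s : PVSt) (i : Int) : PVSt :=
  (PySem.List.pyRange 0 (pvRow0Len s.1) 1).foldl (pvInnerB i) s

def assign_groups_alt (matrix : List (List Int)) : List (Int × List (Int × Int)) :=
  ((PySem.List.pyRange 0 (matrix.length : Int) 1).foldl pvOuterB
    (matrix, PySem.Dict.empty, (1 : Int))).2.1.items

-- ===== PRECONDITION & SPEC =====
-- Pre_ excludes exactly the ragged matrices with a row shorter than row 0: there Python A's
-- `matrix[i][j]` raises IndexError (and Python B raises identically).
def Pre_assign_groups (matrix : List (List Int)) : Prop :=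
  ∀ row ∈ matrix, (matrix.headD []).length ≤ row.length
instance (matrix : List (List Int)) : Decidable (Pre_assign_groups matrix) := by
  unfold Pre_assign_groups; infer_instance

def pvWitness_assign_groups : List (List Int) := [[2, 0, 2], [0, 2, 0]]

def Spec_assign_groups (matrix : List (List Int)) (out : List (Int × List (Int × Int))) : Prop :=
  out = assign_groups_alt matrix
instance (matrix : List (List Int)) (out : List (Int × List (Int × Int))) :
    Decidable (Spec_assign_groups matrix out) := by unfold Spec_assign_groups; infer_instance

-- ===== CLAIM (what is proved, stated in full; the proofs are below) =====
def Claim_equal_assign_groups : Prop := ∀ (matrix : List (List Int)), Dom_assign_groups matrix →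
  Pre_assign_groups matrix → Spec_assign_groups matrix (assign_groups matrix)

-- ===== LEMMAS AND PROOFS =====

-- abbreviations used by the proofs only
def pvDfsC (m : List (List Int)) (i j g : Int) (gs : PySem.Dict Int (List (Int × Int))) :
    List (List Int) × PySem.Dict Int (List (Int × Int)) × Int :=
  dfsA (pvCount2 m + 1) m i j g gs

def pvFold : List (List Int) → List (Int × Int) → Int → PySem.Dict Int (List (Int × Int)) →
    List (List Int) × PySem.Dict Int (List (Int × Int))
  | m, [], _, gs => (m, gs)
  | m, c :: cs, g, gs =>
    pvFold (pvDfsC m c.1 c.2 g gs).1 cs g (pvDfsC m c.1 c.2 g gs).2.1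

def pvUpd (gs : PySem.Dict Int (List (Int × Int))) (g : Int) (acc : List (Int × Int)) :
    PySem.Dict Int (List (Int × Int)) :=
  acc.foldl (fun d c => d.modify g [] (fun l => l ++ [c])) gs

def pvPhi (m : List (List Int)) (st : List (Int × Int)) : Nat := 8 * pvCount2 m + st.length

lemma pvSetCell_length (m : List (List Int)) (i j v : Int) :
    (pvSetCell m i j v).length = m.length := by simp [pvSetCell]

lemma pvRow0Len_set (m : List (List Int)) (i j v : Int) :
    pvRow0Len (pvSetCell m i j v) = pvRow0Len m := by
  rcases m with _ | ⟨r, rs⟩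
  · rfl
  · unfold pvRow0Len pvSetCell
    cases hn : i.toNat with
    | zero => simp [List.getD_cons_zero]
    | succ n => simp

lemma pvCount2_cons (r : List Int) (rs : List (List Int)) :
    pvCount2 (r :: rs) = r.count 2 + pvCount2 rs := by simp [pvCount2]

lemma pvCount2_set_aux :
    ∀ (m : List (List Int)) (n : Nat) (r' : List Int), n < m.length →
      pvCount2 (m.set n r') + (m.getD n []).count 2 = pvCount2 m + r'.count 2 := by
  intro m
  induction m with
  | nil => intro n r' h; simp at h
  | cons r rs ih =>
    intro n r' h
    cases n with
    | zero => simp [pvCount2_cons, List.getD_cons_zero]; omega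
    | succ k =>
      have := ih k r' (by simpa using h)
      simp only [List.set_cons_succ, pvCount2_cons, List.getD_cons_succ]
      omega

lemma pvCount_set_row : ∀ (r : List Int) (k : Nat), r[k]? = some 2 →
    (r.set k 0).count 2 + 1 = r.count 2 := by
  intro r
  induction r with
  | nil => intro k h; simp at h
  | cons a t ih =>
    intro k h
    cases k with
    | zero =>
      simp only [List.getElem?_cons_zero, Option.some.injEq] at h
      subst h
      simp [List.count_cons]
    | succ n =>
      have := ih n (by simpa using h)
      simp only [List.set_cons_succ, List.count_cons]
      omega

lemma pvCell_spec (m : List (List Int)) (i j : Int) (hi : 0 ≤ i) (hj : 0 ≤ j)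
    (h2 : pvCell m i j = 2) :
    i.toNat < m.length ∧ (m.getD i.toNat [])[j.toNat]? = some 2 := by
  unfold pvCell at h2
  rw [← Int.toNat_of_nonneg hi, ← Int.toNat_of_nonneg hj] at h2
  rw [PySem.List.pyGet?_natCast, PySem.List.pyGet?_natCast] at h2
  rcases hrow : m[i.toNat]? with _ | r
  · rw [hrow] at h2; simp at h2
  · rw [hrow] at h2
    simp only [Option.getD_some] at h2
    rcases hv : r[j.toNat]? with _ | v
    · rw [hv] at h2; simp at h2
    · rw [hv] at h2
      simp only [Option.getD_some] at h2
      subst h2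
      refine ⟨by exact (List.getElem?_eq_some_iff.mp hrow).choose, ?_⟩
      have hg : m.getD i.toNat [] = r := by
        simp [List.getD_eq_getElem?_getD, hrow]
      rw [hg, hv]

lemma pvCount2_set (m : List (List Int)) (i j : Int) (hi : 0 ≤ i) (hj : 0 ≤ j)
    (h2 : pvCell m i j = 2) : pvCount2 (pvSetCell m i j 0) + 1 = pvCount2 m := by
  obtain ⟨hil, hget⟩ := pvCell_spec m i j hi hj h2
  have haux := pvCount2_set_aux m i.toNat ((m.getD i.toNat []).set j.toNat 0) hil
  have hrow := pvCount_set_row (m.getD i.toNat []) j.toNat hget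
  unfold pvSetCell
  omega

-- from the failed bounds guard: 0 ≤ i and 0 ≤ j
lemma pvGuard_bounds {m : List (List Int)} {i j : Int}
    (h : ¬(i < 0 ∨ (m.length : Int) ≤ i ∨ j < 0 ∨ pvRow0Len m ≤ j)) :
    0 ≤ i ∧ 0 ≤ j := by
  push_neg at h
  exact ⟨h.1, h.2.2.1⟩

lemma dfsA_count_le : ∀ (f : Nat) (m : List (List Int)) (i j g : Int)
    (gs : PySem.Dict Int (List (Int × Int))),
    pvCount2 (dfsA f m i j g gs).1 ≤ pvCount2 m := by
  intro f
  induction f with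
  | zero => intro m i j g gs; simp [dfsA]
  | succ f ih =>
    intro m i j g gs
    simp only [dfsA]
    split_ifs with hg hc
    · exact le_refl _
    · exact le_refl _
    · obtain ⟨hi, hj⟩ := pvGuard_bounds hg
      have hm0 := pvCount2_set m i j hi hj (not_not.mp hc)
      refine le_trans (ih _ _ _ _ _) ?_
      refine le_trans (ih _ _ _ _ _) ?_
      refine le_trans (ih _ _ _ _ _) ?_
      refine le_trans (ih _ _ _ _ _) ?_
      refine le_trans (ih _ _ _ _ _) ?_
      refine le_trans (ih _ _ _ _ _) ?_
      refine le_trans (ih _ _ _ _ _) ?_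
      refine le_trans (ih _ _ _ _ _) ?_
      omega

lemma dfsA_fuel : ∀ (f1 f2 : Nat) (m : List (List Int)) (i j g : Int)
    (gs : PySem.Dict Int (List (Int × Int))),
    pvCount2 m < f1 → pvCount2 m < f2 →
    dfsA f1 m i j g gs = dfsA f2 m i j g gs := by
  intro f1
  induction f1 with
  | zero => intro f2 m i j g gs h1 h2; omega
  | succ f ih =>
    intro f2 m i j g gs h1 h2
    cases f2 with
    | zero => omega
    | succ f2 =>
      simp only [dfsA]
      split_ifs with hg hc
      · rfl
      · rfl
      · obtain ⟨hi, hj⟩ := pvGuard_bounds hg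
        have hm0 := pvCount2_set m i j hi hj (not_not.mp hc)
        set m0 := pvSetCell m i j 0 with hm0d
        set gs0 := gs.modify g [] (fun l => l ++ [(i, j)]) with hgs0d
        have e1 : dfsA f m0 (i + 1) j g gs0 = dfsA f2 m0 (i + 1) j g gs0 :=
          ih f2 _ _ _ _ _ (by omega) (by omega)
        rw [e1]
        set t1 := dfsA f2 m0 (i + 1) j g gs0 with ht1
        have hc1 : pvCount2 t1.1 ≤ pvCount2 m0 := by rw [ht1]; exact dfsA_count_le _ _ _ _ _ _
        have e2 : dfsA f t1.1 (i - 1) j g t1.2.1 = dfsA f2 t1.1 (i - 1) j g t1.2.1 :=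
          ih f2 _ _ _ _ _ (by omega) (by omega)
        rw [e2]
        set t2 := dfsA f2 t1.1 (i - 1) j g t1.2.1 with ht2
        have hc2 : pvCount2 t2.1 ≤ pvCount2 t1.1 := by rw [ht2]; exact dfsA_count_le _ _ _ _ _ _
        have e3 : dfsA f t2.1 i (j + 1) g t2.2.1 = dfsA f2 t2.1 i (j + 1) g t2.2.1 :=
          ih f2 _ _ _ _ _ (by omega) (by omega)
        rw [e3]
        set t3 := dfsA f2 t2.1 i (j + 1) g t2.2.1 with ht3
        have hc3 : pvCount2 t3.1 ≤ pvCount2 t2.1 := by rw [ht3]; exact dfsA_count_le _ _ _ _ _ _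
        have e4 : dfsA f t3.1 i (j - 1) g t3.2.1 = dfsA f2 t3.1 i (j - 1) g t3.2.1 :=
          ih f2 _ _ _ _ _ (by omega) (by omega)
        rw [e4]
        set t4 := dfsA f2 t3.1 i (j - 1) g t3.2.1 with ht4
        have hc4 : pvCount2 t4.1 ≤ pvCount2 t3.1 := by rw [ht4]; exact dfsA_count_le _ _ _ _ _ _
        have e5 : dfsA f t4.1 (i + 1) (j + 1) g t4.2.1 = dfsA f2 t4.1 (i + 1) (j + 1) g t4.2.1 :=
          ih f2 _ _ _ _ _ (by omega) (by omega)
        rw [e5]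
        set t5 := dfsA f2 t4.1 (i + 1) (j + 1) g t4.2.1 with ht5
        have hc5 : pvCount2 t5.1 ≤ pvCount2 t4.1 := by rw [ht5]; exact dfsA_count_le _ _ _ _ _ _
        have e6 : dfsA f t5.1 (i - 1) (j - 1) g t5.2.1 = dfsA f2 t5.1 (i - 1) (j - 1) g t5.2.1 :=
          ih f2 _ _ _ _ _ (by omega) (by omega)
        rw [e6]
        set t6 := dfsA f2 t5.1 (i - 1) (j - 1) g t5.2.1 with ht6
        have hc6 : pvCount2 t6.1 ≤ pvCount2 t5.1 := by rw [ht6]; exact dfsA_count_le _ _ _ _ _ _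
        have e7 : dfsA f t6.1 (i - 1) (j + 1) g t6.2.1 = dfsA f2 t6.1 (i - 1) (j + 1) g t6.2.1 :=
          ih f2 _ _ _ _ _ (by omega) (by omega)
        rw [e7]
        set t7 := dfsA f2 t6.1 (i - 1) (j + 1) g t6.2.1 with ht7
        have hc7 : pvCount2 t7.1 ≤ pvCount2 t6.1 := by rw [ht7]; exact dfsA_count_le _ _ _ _ _ _
        have e8 : dfsA f t7.1 (i + 1) (j - 1) g t7.2.1 = dfsA f2 t7.1 (i + 1) (j - 1) g t7.2.1 :=
          ih f2 _ _ _ _ _ (by omega) (by omega)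
        rw [e8]

lemma altLoop_acc : ∀ (f : Nat) (m : List (List Int)) (st cells : List (Int × Int)),
    altLoop f m st cells = ((altLoop f m st []).1, cells ++ (altLoop f m st []).2) := by
  intro f
  induction f with
  | zero => intro m st cells; simp [altLoop]
  | succ f ih =>
    intro m st cells
    cases st with
    | nil => simp [altLoop]
    | cons c st' =>
      obtain ⟨ci, cj⟩ := c
      simp only [altLoop]
      split_ifs with hg hc
      · exact ih m st' cells
      · exact ih m st' cells
      · rw [ih (pvSetCell m ci cj 0) (pvNbrs ci cj ++ st') (cells ++ [(ci, cj)]),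
            ih (pvSetCell m ci cj 0) (pvNbrs ci cj ++ st') ([] ++ [(ci, cj)])]
        simp

lemma altLoop_count_le : ∀ (f : Nat) (m : List (List Int)) (st cells : List (Int × Int)),
    pvCount2 (altLoop f m st cells).1 ≤ pvCount2 m := by
  intro f
  induction f with
  | zero => intro m st cells; simp [altLoop]
  | succ f ih =>
    intro m st cells
    cases st with
    | nil => simp [altLoop]
    | cons c st' =>
      obtain ⟨ci, cj⟩ := c
      simp only [altLoop]
      split_ifs with hg hc
      · exact ih m st' cells
      · exact ih m st' cells
      · obtain ⟨hi, hj⟩ := pvGuard_bounds hg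
        have hm0 := pvCount2_set m ci cj hi hj (not_not.mp hc)
        exact le_trans (ih _ _ _) (by omega)

lemma altLoop_shape : ∀ (f : Nat) (m : List (List Int)) (st cells : List (Int × Int)),
    (altLoop f m st cells).1.length = m.length ∧
      pvRow0Len (altLoop f m st cells).1 = pvRow0Len m := by
  intro f
  induction f with
  | zero => intro m st cells; simp [altLoop]
  | succ f ih =>
    intro m st cells
    cases st with
    | nil => simp [altLoop]
    | cons c st' =>
      obtain ⟨ci, cj⟩ := c
      simp only [altLoop]
      split_ifs with hg hc
      · exact ih m st' cells
      · exact ih m st' cells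
      · obtain ⟨h1, h2⟩ := ih (pvSetCell m ci cj 0) (pvNbrs ci cj ++ st') (cells ++ [(ci, cj)])
        exact ⟨by rw [h1, pvSetCell_length], by rw [h2, pvRow0Len_set]⟩

lemma altLoop_fuel : ∀ (f1 f2 : Nat) (m : List (List Int)) (st cells : List (Int × Int)),
    pvPhi m st < f1 → pvPhi m st < f2 →
    altLoop f1 m st cells = altLoop f2 m st cells := by
  intro f1
  induction f1 with
  | zero => intro f2 m st cells h1 h2; omega
  | succ f ih =>
    intro f2 m st cells h1 h2
    cases f2 with
    | zero => omega
    | succ f2 =>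
      cases st with
      | nil => simp [altLoop]
      | cons c st' =>
        obtain ⟨ci, cj⟩ := c
        have hphi : pvPhi m (⟨ci, cj⟩ :: st') = pvPhi m st' + 1 := by
          simp only [pvPhi, List.length_cons]; omega
        simp only [altLoop]
        split_ifs with hg hc
        · exact ih f2 m st' cells (by omega) (by omega)
        · exact ih f2 m st' cells (by omega) (by omega)
        · obtain ⟨hi, hj⟩ := pvGuard_bounds hg
          have hm0 := pvCount2_set m ci cj hi hj (not_not.mp hc)
          have hphi' : pvPhi (pvSetCell m ci cj 0) (pvNbrs ci cj ++ st') + 1 =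
              pvPhi m (⟨ci, cj⟩ :: st') := by
            simp only [pvPhi, pvNbrs, List.length_append, List.length_cons, List.length_nil]
            omega
          exact ih f2 _ _ _ (by omega) (by omega)

lemma altLoop_append : ∀ (f : Nat) (m : List (List Int)) (xs ys cells : List (Int × Int)),
    pvPhi m (xs ++ ys) < f →
    altLoop f m (xs ++ ys) cells =
      altLoop f (altLoop f m xs cells).1 ys (altLoop f m xs cells).2 := by
  intro f
  induction f with
  | zero => intro m xs ys cells h; omega
  | succ f ih =>
    intro m xs ys cells h
    cases xs with
    | nil => simp [altLoop]
    | cons c xs' =>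
      obtain ⟨ci, cj⟩ := c
      have hphi : pvPhi m ((⟨ci, cj⟩ :: xs') ++ ys) = pvPhi m (xs' ++ ys) + 1 := by
        simp only [pvPhi, List.cons_append, List.length_cons]; omega
      simp only [List.cons_append, altLoop]
      split_ifs with hg hc
      · rw [ih m xs' ys cells (by omega)]
        have hle := altLoop_count_le f m xs' cells
        refine altLoop_fuel f (f + 1) _ ys _ ?_ ?_
        · have : pvPhi (altLoop f m xs' cells).1 ys ≤ pvPhi m (xs' ++ ys) := by
            simp only [pvPhi, List.length_append]; omega
          omega
        · have : pvPhi (altLoop f m xs' cells).1 ys ≤ pvPhi m (xs' ++ ys) := by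
            simp only [pvPhi, List.length_append]; omega
          omega
      · rw [ih m xs' ys cells (by omega)]
        have hle := altLoop_count_le f m xs' cells
        refine altLoop_fuel f (f + 1) _ ys _ ?_ ?_
        · have : pvPhi (altLoop f m xs' cells).1 ys ≤ pvPhi m (xs' ++ ys) := by
            simp only [pvPhi, List.length_append]; omega
          omega
        · have : pvPhi (altLoop f m xs' cells).1 ys ≤ pvPhi m (xs' ++ ys) := by
            simp only [pvPhi, List.length_append]; omega
          omega
      · obtain ⟨hi, hj⟩ := pvGuard_bounds hg
        have hm0 := pvCount2_set m ci cj hi hj (not_not.mp hc)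
        have hphi2 : pvPhi (pvSetCell m ci cj 0) ((pvNbrs ci cj ++ xs') ++ ys) + 1 =
            pvPhi m ((⟨ci, cj⟩ :: xs') ++ ys) := by
          simp only [pvPhi, pvNbrs, List.length_append, List.length_cons, List.length_nil,
            List.cons_append]
          omega
        rw [← List.append_assoc]
        rw [ih (pvSetCell m ci cj 0) (pvNbrs ci cj ++ xs') ys (cells ++ [(ci, cj)]) (by omega)]
        have hle := altLoop_count_le f (pvSetCell m ci cj 0) (pvNbrs ci cj ++ xs') (cells ++ [(ci, cj)])
        have hb : pvPhi (altLoop f (pvSetCell m ci cj 0) (pvNbrs ci cj ++ xs') (cells ++ [(ci, cj)])).1 ys ≤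
            pvPhi (pvSetCell m ci cj 0) ((pvNbrs ci cj ++ xs') ++ ys) := by
          simp only [pvPhi, List.length_append]; omega
        exact altLoop_fuel f (f + 1) _ ys _ (by omega) (by omega)

lemma pvDfsC_skip (m : List (List Int)) (i j g : Int) (gs : PySem.Dict Int (List (Int × Int)))
    (h : (i < 0 ∨ (m.length : Int) ≤ i ∨ j < 0 ∨ pvRow0Len m ≤ j) ∨ pvCell m i j ≠ 2) :
    pvDfsC m i j g gs = (m, gs, g) := by
  simp only [pvDfsC, dfsA]
  split_ifs with h1 h2
  · rfl
  · rfl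
  · exfalso; rcases h with h | h
    · exact h1 h
    · exact h2 h

lemma pvDfsC_productive (m : List (List Int)) (i j g : Int)
    (gs : PySem.Dict Int (List (Int × Int)))
    (hg : ¬(i < 0 ∨ (m.length : Int) ≤ i ∨ j < 0 ∨ pvRow0Len m ≤ j))
    (h2 : pvCell m i j = 2) :
    pvDfsC m i j g gs =
      ((pvFold (pvSetCell m i j 0) (pvNbrs i j) g (gs.modify g [] (fun l => l ++ [(i, j)]))).1,
       (pvFold (pvSetCell m i j 0) (pvNbrs i j) g (gs.modify g [] (fun l => l ++ [(i, j)]))).2,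
       g + 1) := by
  obtain ⟨hi, hj⟩ := pvGuard_bounds hg
  have hm0 := pvCount2_set m i j hi hj h2
  simp only [pvDfsC, dfsA]
  rw [if_neg hg, if_neg (by simp [h2])]
  set m0 := pvSetCell m i j 0 with hm0d
  set gs0 := gs.modify g [] (fun l => l ++ [(i, j)]) with hgs0d
  have e1 : dfsA (pvCount2 m) m0 (i + 1) j g gs0 = pvDfsC m0 (i + 1) j g gs0 :=
    dfsA_fuel _ _ _ _ _ _ _ (by omega) (by omega)
  rw [e1]
  set t1 := pvDfsC m0 (i + 1) j g gs0 with ht1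
  have hc1 : pvCount2 t1.1 ≤ pvCount2 m0 := by rw [ht1]; exact dfsA_count_le _ _ _ _ _ _
  have e2 : dfsA (pvCount2 m) t1.1 (i - 1) j g t1.2.1 = pvDfsC t1.1 (i - 1) j g t1.2.1 :=
    dfsA_fuel _ _ _ _ _ _ _ (by omega) (by omega)
  rw [e2]
  set t2 := pvDfsC t1.1 (i - 1) j g t1.2.1 with ht2
  have hc2 : pvCount2 t2.1 ≤ pvCount2 t1.1 := by rw [ht2]; exact dfsA_count_le _ _ _ _ _ _
  have e3 : dfsA (pvCount2 m) t2.1 i (j + 1) g t2.2.1 = pvDfsC t2.1 i (j + 1) g t2.2.1 :=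
    dfsA_fuel _ _ _ _ _ _ _ (by omega) (by omega)
  rw [e3]
  set t3 := pvDfsC t2.1 i (j + 1) g t2.2.1 with ht3
  have hc3 : pvCount2 t3.1 ≤ pvCount2 t2.1 := by rw [ht3]; exact dfsA_count_le _ _ _ _ _ _
  have e4 : dfsA (pvCount2 m) t3.1 i (j - 1) g t3.2.1 = pvDfsC t3.1 i (j - 1) g t3.2.1 :=
    dfsA_fuel _ _ _ _ _ _ _ (by omega) (by omega)
  rw [e4]
  set t4 := pvDfsC t3.1 i (j - 1) g t3.2.1 with ht4
  have hc4 : pvCount2 t4.1 ≤ pvCount2 t3.1 := by rw [ht4]; exact dfsA_count_le _ _ _ _ _ _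
  have e5 : dfsA (pvCount2 m) t4.1 (i + 1) (j + 1) g t4.2.1 = pvDfsC t4.1 (i + 1) (j + 1) g t4.2.1 :=
    dfsA_fuel _ _ _ _ _ _ _ (by omega) (by omega)
  rw [e5]
  set t5 := pvDfsC t4.1 (i + 1) (j + 1) g t4.2.1 with ht5
  have hc5 : pvCount2 t5.1 ≤ pvCount2 t4.1 := by rw [ht5]; exact dfsA_count_le _ _ _ _ _ _
  have e6 : dfsA (pvCount2 m) t5.1 (i - 1) (j - 1) g t5.2.1 = pvDfsC t5.1 (i - 1) (j - 1) g t5.2.1 :=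
    dfsA_fuel _ _ _ _ _ _ _ (by omega) (by omega)
  rw [e6]
  set t6 := pvDfsC t5.1 (i - 1) (j - 1) g t5.2.1 with ht6
  have hc6 : pvCount2 t6.1 ≤ pvCount2 t5.1 := by rw [ht6]; exact dfsA_count_le _ _ _ _ _ _
  have e7 : dfsA (pvCount2 m) t6.1 (i - 1) (j + 1) g t6.2.1 = pvDfsC t6.1 (i - 1) (j + 1) g t6.2.1 :=
    dfsA_fuel _ _ _ _ _ _ _ (by omega) (by omega)
  rw [e7]
  set t7 := pvDfsC t6.1 (i - 1) (j + 1) g t6.2.1 with ht7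
  have hc7 : pvCount2 t7.1 ≤ pvCount2 t6.1 := by rw [ht7]; exact dfsA_count_le _ _ _ _ _ _
  have e8 : dfsA (pvCount2 m) t7.1 (i + 1) (j - 1) g t7.2.1 = pvDfsC t7.1 (i + 1) (j - 1) g t7.2.1 :=
    dfsA_fuel _ _ _ _ _ _ _ (by omega) (by omega)
  rw [e8]
  set t8 := pvDfsC t7.1 (i + 1) (j - 1) g t7.2.1 with ht8
  have hfold : pvFold m0 (pvNbrs i j) g gs0 = (t8.1, t8.2.1) := by
    simp only [pvNbrs, pvFold]
    rw [← ht1, ← ht2, ← ht3, ← ht4, ← ht5, ← ht6, ← ht7, ← ht8]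
  rw [hfold]

lemma pvUpd_append (gs : PySem.Dict Int (List (Int × Int))) (g : Int)
    (a b : List (Int × Int)) : pvUpd gs g (a ++ b) = pvUpd (pvUpd gs g a) g b := by
  simp [pvUpd, List.foldl_append]

lemma pvUpd_eq_insert : ∀ (acc : List (Int × Int)) (d : PySem.Dict Int (List (Int × Int)))
    (g : Int), acc ≠ [] → pvUpd d g acc = d.insert g (d.getD g [] ++ acc) := by
  intro acc
  induction acc with
  | nil => intro d g h; exact absurd rfl h
  | cons c l ih =>
    intro d g _
    cases l with
    | nil => rfl
    | cons c2 l2 =>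
      have step : pvUpd d g (c :: c2 :: l2) =
          pvUpd (d.insert g (d.getD g [] ++ [c])) g (c2 :: l2) := rfl
      rw [step, ih _ g (by simp), PySem.Dict.getD_insert_self,
        PySem.Dict.insert_insert_self]
      simp

lemma pvBridge : ∀ (f : Nat) (m : List (List Int)) (cells : List (Int × Int)) (g : Int)
    (gs : PySem.Dict Int (List (Int × Int))), pvPhi m cells < f →
    pvFold m cells g gs =
      ((altLoop f m cells []).1, pvUpd gs g (altLoop f m cells []).2) := by
  intro f
  induction f with
  | zero => intro m cells g gs h; omega
  | succ f ih =>
    intro m cells g gs h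
    cases cells with
    | nil => simp [altLoop, pvFold, pvUpd]
    | cons c cs =>
      obtain ⟨ci, cj⟩ := c
      have hphi : pvPhi m (⟨ci, cj⟩ :: cs) = 8 * pvCount2 m + cs.length + 1 := by
        simp only [pvPhi, List.length_cons]; omega
      have h' : 8 * pvCount2 m + cs.length + 1 < f + 1 := by rw [← hphi]; exact h
      by_cases hg : ci < 0 ∨ (m.length : Int) ≤ ci ∨ cj < 0 ∨ pvRow0Len m ≤ cj
      · have hfold : pvFold m (⟨ci, cj⟩ :: cs) g gs = pvFold m cs g gs := by
          simp only [pvFold]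
          rw [pvDfsC_skip m ci cj g gs (Or.inl hg)]
        have halt : altLoop (f + 1) m (⟨ci, cj⟩ :: cs) [] = altLoop f m cs [] := by
          simp only [altLoop]
          rw [if_pos hg]
        rw [hfold, halt]
        exact ih m cs g gs (by simp only [pvPhi]; omega)
      · by_cases hc : pvCell m ci cj = 2
        · -- productive step
          obtain ⟨hi, hj⟩ := pvGuard_bounds hg
          have hm0 := pvCount2_set m ci cj hi hj hc
          have hn8 : (pvNbrs ci cj).length = 8 := rfl
          have hfold : pvFold m (⟨ci, cj⟩ :: cs) g gs =
              pvFold (pvFold (pvSetCell m ci cj 0) (pvNbrs ci cj) g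
                  (gs.modify g [] (fun l => l ++ [(ci, cj)]))).1 cs g
                (pvFold (pvSetCell m ci cj 0) (pvNbrs ci cj) g
                  (gs.modify g [] (fun l => l ++ [(ci, cj)]))).2 := by
            simp only [pvFold]
            rw [pvDfsC_productive m ci cj g gs hg hc]
          set m0 := pvSetCell m ci cj 0 with hm0d
          set gs0 := gs.modify g [] (fun l => l ++ [(ci, cj)]) with hgs0d
          have hT := ih m0 (pvNbrs ci cj) g gs0 (by
            simp only [pvPhi, hn8]
            omega)
          rw [hfold, hT]
          dsimp only
          set M1 := (altLoop f m0 (pvNbrs ci cj) []).1 with hM1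
          set A1 := (altLoop f m0 (pvNbrs ci cj) []).2 with hA1
          have hcM1 : pvCount2 M1 ≤ pvCount2 m0 := by
            rw [hM1]; exact altLoop_count_le f m0 (pvNbrs ci cj) []
          have hT2 := ih M1 cs g (pvUpd gs0 g A1) (by
            simp only [pvPhi]
            omega)
          rw [hT2]
          set M2 := (altLoop f M1 cs []).1 with hM2
          set A2 := (altLoop f M1 cs []).2 with hA2
          -- now the right-hand side
          have halt : altLoop (f + 1) m (⟨ci, cj⟩ :: cs) [] =
              altLoop f m0 (pvNbrs ci cj ++ cs) ([] ++ [(ci, cj)]) := by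
            simp only [altLoop]
            rw [if_neg hg, if_neg (by simp [hc])]
          have happ : altLoop f m0 (pvNbrs ci cj ++ cs) ([] ++ [(ci, cj)]) =
              altLoop f (altLoop f m0 (pvNbrs ci cj) ([] ++ [(ci, cj)])).1 cs
                (altLoop f m0 (pvNbrs ci cj) ([] ++ [(ci, cj)])).2 := by
            refine altLoop_append f m0 (pvNbrs ci cj) cs ([] ++ [(ci, cj)]) ?_
            simp only [pvPhi, List.length_append, hn8]
            omega
          have hacc1 := altLoop_acc f m0 (pvNbrs ci cj) ([] ++ [(ci, cj)])
          have hacc2 := altLoop_acc f M1 cs (([] ++ [(ci, cj)]) ++ A1)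
          rw [halt, happ, hacc1]
          dsimp only
          rw [← hM1, ← hA1, hacc2]
          dsimp only
          rw [← hM2, ← hA2]
          refine congrArg (fun d => (M2, d)) ?_
          have h1 : (([] : List (Int × Int)) ++ [(ci, cj)]) ++ A1 ++ A2 =
              ([(ci, cj)] ++ A1) ++ A2 := by simp
          rw [h1, pvUpd_append, pvUpd_append, hgs0d]
          rfl
        · -- cell is not 2: skipped on both sides
          have hfold : pvFold m (⟨ci, cj⟩ :: cs) g gs = pvFold m cs g gs := by
            simp only [pvFold]
            rw [pvDfsC_skip m ci cj g gs (Or.inr hc)]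
          have halt : altLoop (f + 1) m (⟨ci, cj⟩ :: cs) [] = altLoop f m cs [] := by
            simp only [altLoop]
            rw [if_neg hg, if_pos hc]
          rw [hfold, halt]
          exact ih m cs g gs (by simp only [pvPhi]; omega)

lemma pvBody_eq (i j : Int) (s : PVSt) (hi : 0 ≤ i) (hil : i < (s.1.length : Int))
    (hj : 0 ≤ j) (hjl : j < pvRow0Len s.1)
    (hinv : ∀ k : Int, s.2.2 ≤ k → s.2.1.get? k = none) :
    pvInnerA i s j = pvInnerB i s j ∧
    (pvInnerB i s j).1.length = s.1.length ∧
    pvRow0Len (pvInnerB i s j).1 = pvRow0Len s.1 ∧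
    (∀ k : Int, (pvInnerB i s j).2.2 ≤ k → (pvInnerB i s j).2.1.get? k = none) ∧
    s.2.2 ≤ (pvInnerB i s j).2.2 := by
  obtain ⟨m, gs, g⟩ := s
  dsimp only at hil hjl hinv ⊢
  by_cases hc : pvCell m i j = 2
  · have hg : ¬(i < 0 ∨ (m.length : Int) ≤ i ∨ j < 0 ∨ pvRow0Len m ≤ j) := by
      push_neg
      exact ⟨hi, hil, hj, hjl⟩
    have hm0 := pvCount2_set m i j hi hj hc
    have hphi1 : pvPhi m [(i, j)] < 8 * pvCount2 m + 2 := by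
      simp only [pvPhi, List.length_cons, List.length_nil]
      omega
    set R := altLoop (8 * pvCount2 m + 2) m [(i, j)] [] with hR
    have hb := pvBridge (8 * pvCount2 m + 2) m [(i, j)] g gs hphi1
    rw [← hR] at hb
    have hsingle : pvFold m [(i, j)] g gs =
        ((pvDfsC m i j g gs).1, (pvDfsC m i j g gs).2.1) := rfl
    rw [hsingle] at hb
    have h1 : (pvDfsC m i j g gs).1 = R.1 := congrArg Prod.fst hb
    have h2 : (pvDfsC m i j g gs).2.1 = pvUpd gs g R.2 := congrArg Prod.snd hb
    have ht3 : (pvDfsC m i j g gs).2.2 = g + 1 := by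
      rw [pvDfsC_productive m i j g gs hg hc]
    have hA : dfsA (pvCount2 m + 1) m i j g gs = (R.1, pvUpd gs g R.2, g + 1) := by
      have hsplit : pvDfsC m i j g gs = ((pvDfsC m i j g gs).1,
          (pvDfsC m i j g gs).2.1, (pvDfsC m i j g gs).2.2) := rfl
      show pvDfsC m i j g gs = _
      rw [hsplit, h1, h2, ht3]
    -- R.2 starts with (i, j), in particular it is nonempty
    have hstep : R = altLoop (pvPhi m [(i, j)]) (pvSetCell m i j 0)
        (pvNbrs i j ++ []) ([] ++ [(i, j)]) := by
      rw [hR, altLoop_fuel (8 * pvCount2 m + 2) (pvPhi m [(i, j)] + 1) m [(i, j)] []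
        hphi1 (by omega)]
      simp only [altLoop]
      rw [if_neg hg, if_neg (by simp [hc])]
    have hne : R.2 ≠ [] := by
      rw [hstep, altLoop_acc]
      simp
    have hfresh : gs.get? g = none := hinv g le_rfl
    have hupd : pvUpd gs g R.2 = gs.insert g R.2 := by
      rw [pvUpd_eq_insert R.2 gs g hne, PySem.Dict.getD_eq_get?_getD, hfresh]
      simp
    have hBval : pvInnerB i (m, gs, g) j = (R.1, gs.insert g R.2, g + 1) := by
      simp only [pvInnerB]
      rw [if_pos hc, ← hR]
    have hAval : pvInnerA i (m, gs, g) j = (R.1, gs.insert g R.2, g + 1) := by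
      simp only [pvInnerA]
      rw [if_pos hc, hA, hupd]
    have hshape := altLoop_shape (8 * pvCount2 m + 2) m [(i, j)] []
    rw [← hR] at hshape
    refine ⟨hAval.trans hBval.symm, ?_, ?_, ?_, ?_⟩
    · rw [hBval]; exact hshape.1
    · rw [hBval]; exact hshape.2
    · rw [hBval]
      intro k hk
      dsimp only at hk ⊢
      rw [PySem.Dict.get?_insert]
      rw [if_neg (by omega : ¬k = g)]
      exact hinv k (by omega)
    · rw [hBval]; dsimp only; omega
  · have hAval : pvInnerA i (m, gs, g) j = (m, gs, g) := by
      simp only [pvInnerA]; rw [if_neg hc]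
    have hBval : pvInnerB i (m, gs, g) j = (m, gs, g) := by
      simp only [pvInnerB]; rw [if_neg hc]
    refine ⟨hAval.trans hBval.symm, ?_, ?_, ?_, ?_⟩
    · rw [hBval]
    · rw [hBval]
    · rw [hBval]; exact hinv
    · rw [hBval]

lemma pvInner_fold (i : Int) (hi : 0 ≤ i) :
    ∀ (J : List Int) (s : PVSt),
    (∀ j ∈ J, 0 ≤ j ∧ j < pvRow0Len s.1) →
    i < (s.1.length : Int) →
    (∀ k : Int, s.2.2 ≤ k → s.2.1.get? k = none) →
    J.foldl (pvInnerA i) s = J.foldl (pvInnerB i) s ∧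
    (J.foldl (pvInnerB i) s).1.length = s.1.length ∧
    pvRow0Len (J.foldl (pvInnerB i) s).1 = pvRow0Len s.1 ∧
    (∀ k : Int, (J.foldl (pvInnerB i) s).2.2 ≤ k →
      (J.foldl (pvInnerB i) s).2.1.get? k = none) ∧
    s.2.2 ≤ (J.foldl (pvInnerB i) s).2.2 := by
  intro J
  induction J with
  | nil => intro s _ _ hinv; exact ⟨rfl, rfl, rfl, hinv, le_rfl⟩
  | cons j J' ih =>
    intro s hJ hil hinv
    obtain ⟨hj0, hjl⟩ := hJ j (by simp)
    obtain ⟨heq, hlen, hrow, hinv', hle⟩ := pvBody_eq i j s hi hil hj0 hjl hinv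
    rw [List.foldl_cons, List.foldl_cons, heq]
    obtain ⟨heq2, hlen2, hrow2, hinv2, hle2⟩ := ih (pvInnerB i s j)
      (fun j' hj' => ⟨(hJ j' (List.mem_cons_of_mem _ hj')).1,
        by rw [hrow]; exact (hJ j' (List.mem_cons_of_mem _ hj')).2⟩)
      (by rw [hlen]; exact hil) hinv'
    exact ⟨heq2, by rw [hlen2, hlen], by rw [hrow2, hrow], hinv2, le_trans hle hle2⟩

lemma pvOuter_fold :
    ∀ (I : List Int) (s : PVSt),
    (∀ i ∈ I, 0 ≤ i ∧ i < (s.1.length : Int)) →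
    (∀ k : Int, s.2.2 ≤ k → s.2.1.get? k = none) →
    I.foldl pvOuterA s = I.foldl pvOuterB s ∧
    (I.foldl pvOuterB s).1.length = s.1.length ∧
    (∀ k : Int, (I.foldl pvOuterB s).2.2 ≤ k →
      (I.foldl pvOuterB s).2.1.get? k = none) := by
  intro I
  induction I with
  | nil => intro s _ hinv; exact ⟨rfl, rfl, hinv⟩
  | cons i I' ih =>
    intro s hI hinv
    obtain ⟨hi0, hil⟩ := hI i (by simp)
    obtain ⟨heq, hlen, _hrow, hinv', _hle⟩ := pvInner_fold i hi0
      (PySem.List.pyRange 0 (pvRow0Len s.1) 1) s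
      (fun j hj => PySem.List.mem_pyRange_one.mp hj) hil hinv
    rw [List.foldl_cons, List.foldl_cons]
    have hAB : pvOuterA s i = pvOuterB s i := heq
    rw [hAB]
    obtain ⟨heq2, hlen2, hinv2⟩ := ih (pvOuterB s i)
      (fun i' hi' => ⟨(hI i' (List.mem_cons_of_mem _ hi')).1,
        by rw [show (pvOuterB s i).1.length = s.1.length from hlen];
           exact (hI i' (List.mem_cons_of_mem _ hi')).2⟩) hinv'
    exact ⟨heq2, by rw [hlen2]; exact hlen, hinv2⟩

-- ===== VERDICT (by name: the statement is the Claim_ definition above) =====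
theorem assign_groups_spec : Claim_equal_assign_groups := by
  unfold Claim_equal_assign_groups
  intro matrix _hdom _hpre
  unfold Spec_assign_groups assign_groups assign_groups_alt
  obtain ⟨heq, -, -⟩ := pvOuter_fold (PySem.List.pyRange 0 (matrix.length : Int) 1)
    (matrix, PySem.Dict.empty, (1 : Int))
    (fun i hi => PySem.List.mem_pyRange_one.mp hi)
    (fun k _ => by simp)
  rw [heq]
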